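-- pv_equiv track=rewrite | github.com/MrBrantCode/unitest_baseline | mut_generate/mist_train_taco/taco_11215/solution.py | find_max_divisible_number
-- ===== SOURCE A (Python) =====
-- def find_max_divisible_number(digits):
--     if digits.count(0) == 0:
--         return -1
--
--     digits.remove(0)
--     digits = sorted(digits, reverse=True)
--     ans = []
--
--     while digits:
--         c = sum(digits) % 3
--         if c == 0:
--             break
--         flag = True
--         for i in range(len(digits) - 1, -1, -1):
--             if digits[i] % 3 == c:
--                 digits.pop(i)
--                 flag = False
--                 break
--         if flag:
--             for i in range(len(digits) - 1, -1, -1):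
--                 if digits[i] % 3 != 0:
--                     digits.pop(i)
--                     flag = False
--                     break
--             for i in range(len(digits) - 1, -1, -1):
--                 if digits[i] % 3 != 0:
--                     digits.pop(i)
--                     flag = False
--                     break
--
--     if not digits or digits[0] == 0:
--         return 0
--
--     ans = ''.join(map(str, sorted(digits, reverse=True)))
--     return int(ans + '0')
-- ===== SOURCE B (Python) =====
-- def find_max_divisible_number(digits):
--     if 0 not in digits:
--         return -1
--     digits.remove(0)
--     keys = sorted(set(digits), reverse=True)           # distinct remaining values, descending
--     cnt = {d: digits.count(d) for d in keys}           # multiplicity of each value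
--     c = sum(digits) % 3
--     if c != 0:
--         bad = sorted(d for d in digits if d % 3 == c)
--         # drop one smallest digit of residue c, or else two smallest digits not divisible by 3
--         drops = bad[:1] if bad else sorted(d for d in digits if d % 3 != 0)[:2]
--         for d in drops:
--             cnt[d] -= 1
--     if all(cnt[d] == 0 or d == 0 for d in keys):
--         return 0
--     out = ''.join(str(d) * cnt[d] for d in keys)
--     return int(out + '0')
-- ===== Notes on version B (the rewrite author's own statement) =====
-- stated objective: alternative
-- what changed: A repeatedly re-sorts/rescans a mutable element list (a while loop with index scans and pops); B instead builds a descending distinct-key/count table once, decides the at-most-two removals directly by sorting the relevant residue class and taking its smallest one or two members, and emits the answer from the counts.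
-- outside the precondition, e.g. on find_max_divisible_number([-5, 0, -3, 0, 4]): A returns 0, B raises ValueError; on find_max_divisible_number([0, -1]): A returns 0, B returns 0; on find_max_divisible_number([0, -1, -1, -1]): A raises ValueError, B raises ValueError
import Mathlib
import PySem

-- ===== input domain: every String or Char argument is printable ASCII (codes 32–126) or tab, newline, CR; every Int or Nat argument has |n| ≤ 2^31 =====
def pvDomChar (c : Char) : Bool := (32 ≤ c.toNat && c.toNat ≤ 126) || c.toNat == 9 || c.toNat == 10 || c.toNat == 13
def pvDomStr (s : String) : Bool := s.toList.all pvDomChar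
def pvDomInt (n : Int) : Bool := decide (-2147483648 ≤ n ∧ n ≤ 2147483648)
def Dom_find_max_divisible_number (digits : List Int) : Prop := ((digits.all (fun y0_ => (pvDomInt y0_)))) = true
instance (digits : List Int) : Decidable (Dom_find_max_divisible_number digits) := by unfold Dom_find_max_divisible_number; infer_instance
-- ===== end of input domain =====

-- B replaces A's mutate-sort-and-rescan while loop by a distinct-value/count table and a direct
-- choice of the (at most two) digits to drop; equivalence is about the return value (both Pythons
-- also remove one 0 from the argument list in place, exactly like A).

-- ===== PORT A =====

-- 'for i in range(len(ys)-1, -1, -1): if q(ys[i]): ys.pop(i); break' — returns (popped, rest) on hit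
def pvPopScan (ys : List Int) (q : Int → Bool) : List Int → Option (Int × List Int)
  | [] => none
  | i :: rest =>
    match PySem.List.pyGet? ys i with
    | none => none
    | some v => if q v then PySem.List.pop? ys i else pvPopScan ys q rest

-- A's 'while digits:' loop; fuel only bounds the recursion, each run pops ≥ 1 element or breaks
def pvLoopA : Nat → List Int → List Int
  | 0, ys => ys
  | fuel+1, ys =>
    if ys.isEmpty then ys
    else
      let c := PySem.Int.mod ys.sum 3
      if c = 0 then ys
      else
        match pvPopScan ys (fun v => PySem.Int.mod v 3 == c) (PySem.List.pyRange ((ys.length : Int) - 1) (-1) (-1)) with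
        | some (_, ys') => pvLoopA fuel ys'
        | none =>
          let ys1 :=
            match pvPopScan ys (fun v => PySem.Int.mod v 3 != 0) (PySem.List.pyRange ((ys.length : Int) - 1) (-1) (-1)) with
            | some (_, r) => r
            | none => ys
          let ys2 :=
            match pvPopScan ys1 (fun v => PySem.Int.mod v 3 != 0) (PySem.List.pyRange ((ys1.length : Int) - 1) (-1) (-1)) with
            | some (_, r) => r
            | none => ys1
          pvLoopA fuel ys2

def find_max_divisible_number (digits : List Int) : Int :=
  if PySem.List.count digits 0 = 0 then -1
  else
    match PySem.List.remove? digits 0 with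
    | none => -1  -- unreachable: count ≠ 0 means 0 ∈ digits
    | some d1 =>
      let ds := PySem.List.sorted d1 (fun x => x) true
      let zs := pvLoopA (ds.length + 1) ds
      if zs.isEmpty || (PySem.List.pyGet? zs 0 == some 0) then 0
      else
        match PySem.Int.ofChars? (PySem.Chars.join [] ((PySem.List.sorted zs (fun x => x) true).map PySem.Int.toChars) ++ ['0']) with
        | some n => n
        | none => 0  -- unreachable inside Pre_: nonneg digit strings parse

-- ===== PORT B =====

def find_max_divisible_number_alt (digits : List Int) : Int :=
  if !(decide (0 ∈ digits)) then -1
  else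
    match PySem.List.remove? digits 0 with
    | none => -1  -- unreachable: 0 ∈ digits
    | some xs =>
      let keys := PySem.List.sorted (PySem.Set.ofList xs) (fun x => x) true
      let cnt0 := keys.foldl (fun d k => d.insert k ((PySem.List.count xs k : Int))) PySem.Dict.empty
      let c := PySem.Int.mod xs.sum 3
      let cnt :=
        if c = 0 then cnt0
        else
          let bad := PySem.List.sorted (xs.filter (fun d => PySem.Int.mod d 3 == c)) (fun x => x) false
          let drops :=
            if !bad.isEmpty then bad.take 1
            else (PySem.List.sorted (xs.filter (fun d => PySem.Int.mod d 3 != 0)) (fun x => x) false).take 2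
          drops.foldl (fun d k => d.modify k 0 (· - 1)) cnt0
      if keys.all (fun d => d == 0 || (cnt.getD d 0 == 0)) then 0
      else
        -- ''.join(str(d) * cnt[d] for d in keys); str * n ported as join of replicate (exact, n ≥ 0 here)
        let out := PySem.Chars.join [] (keys.map (fun d => PySem.Chars.join [] (List.replicate (cnt.getD d 0).toNat (PySem.Int.toChars d))))
        match PySem.Int.ofChars? (out ++ ['0']) with
        | some n => n
        | none => 0

-- ===== PRECONDITION & SPEC =====
-- Pre_ excludes lists that contain 0 together with a negative element: there A's final
-- int(''.join(...)) sees a '-' in the middle of the string and raises ValueError for some of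
-- them (e.g. [0,-1,-1,-1]), returning only by accident of which elements the removal loop left;
-- B's digit-string reconstruction likewise cannot represent interleaved negative values.
def Pre_find_max_divisible_number (digits : List Int) : Prop :=
  0 ∉ digits ∨ ∀ d ∈ digits, 0 ≤ d
instance (digits : List Int) : Decidable (Pre_find_max_divisible_number digits) := by
  unfold Pre_find_max_divisible_number; infer_instance

def pvWitness_find_max_divisible_number : List Int := [9, 5, 0, 1]

def Spec_find_max_divisible_number (digits : List Int) (out : Int) : Prop := out = find_max_divisible_number_alt digits
instance (digits : List Int) (out : Int) : Decidable (Spec_find_max_divisible_number digits out) := by unfold Spec_find_max_divisible_number; infer_instance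

-- ===== CLAIM (what is proved, stated in full; the proofs are below) =====
def Claim_equal_find_max_divisible_number : Prop := ∀ (digits : List Int), Dom_find_max_divisible_number digits → Pre_find_max_divisible_number digits → Spec_find_max_divisible_number digits (find_max_divisible_number digits)

-- ===== LEMMAS AND PROOFS =====

-- two descending (≥-pairwise) lists that are permutations of one another are equal
theorem pvDescUnique {ys zs : List Int} (h : ys.Perm zs)
    (p : ys.Pairwise (· ≥ ·)) (q : zs.Pairwise (· ≥ ·)) : ys = zs :=
  List.Perm.eq_of_pairwise (fun a b _ _ h1 h2 => le_antisymm h2 h1) p q h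

-- the descending distinct-value list B sorts, and its count expansion
def pvK (xs : List Int) : List Int := PySem.List.sorted (PySem.Set.ofList xs) (fun x => x) true
def pvCanon (xs : List Int) (f : Int → Int) : List Int :=
  (pvK xs).flatMap (fun d => List.replicate (f d).toNat d)

theorem pvK_nodup (xs : List Int) : (pvK xs).Nodup :=
  ((PySem.List.sorted_perm _ _ _).nodup_iff).mpr (PySem.Set.nodup_ofList xs)
theorem pvK_mem (xs : List Int) (v : Int) : v ∈ pvK xs ↔ v ∈ xs := by
  rw [pvK, PySem.List.mem_sorted, PySem.Set.mem_ofList]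
theorem pvK_pairwise (xs : List Int) : (pvK xs).Pairwise (· > ·) := by
  have h1 := PySem.List.sorted_pairwise_rev (PySem.Set.ofList xs) (fun x => x)
  have h2 := pvK_nodup xs
  exact (h1.and h2).imp (fun {a b} h => lt_of_le_of_ne h.1 (Ne.symm h.2))

theorem pvFlatRep_pairwise (K : List Int) (g : Int → Nat) (hp : K.Pairwise (· > ·)) :
    (K.flatMap (fun d => List.replicate (g d) d)).Pairwise (· ≥ ·) := by
  induction K with
  | nil => simp
  | cons a t ih =>
    rcases List.pairwise_cons.mp hp with ⟨ha, ht⟩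
    rw [List.flatMap_cons, List.pairwise_append]
    refine ⟨List.pairwise_replicate.mpr (Or.inr le_rfl), ih ht, ?_⟩
    intro x hx y hy
    rcases (List.eq_of_mem_replicate hx) with rfl
    rcases List.mem_flatMap.mp hy with ⟨d, hd, hyd⟩
    rcases List.eq_of_mem_replicate hyd with rfl
    exact le_of_lt (ha _ hd)

theorem pvFlatRep_count (K : List Int) (g : Int → Nat) (v : Int) (hnd : K.Nodup) :
    (K.flatMap (fun d => List.replicate (g d) d)).count v = if v ∈ K then g v else 0 := by
  induction K with
  | nil => simp
  | cons a t ih =>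
    rcases List.nodup_cons.mp hnd with ⟨ha, ht⟩
    rw [List.flatMap_cons, List.count_append, List.count_replicate, ih ht]
    by_cases hv : v = a
    · subst hv; simp [ha]
    · simp [hv, Ne.symm hv]

theorem pvCanon_pairwise (xs : List Int) (f : Int → Int) : (pvCanon xs f).Pairwise (· ≥ ·) :=
  pvFlatRep_pairwise _ _ (pvK_pairwise xs)

theorem pvCanon_count (xs : List Int) (f : Int → Int) (v : Int) :
    (pvCanon xs f).count v = if v ∈ xs then (f v).toNat else 0 := by
  rw [pvCanon, pvFlatRep_count _ _ _ (pvK_nodup xs)]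
  by_cases hv : v ∈ xs
  · simp [hv, (pvK_mem xs v).mpr hv]
  · simp [hv, pvK_mem]

theorem pvCanon_mem (xs : List Int) (f : Int → Int) (v : Int) :
    v ∈ pvCanon xs f ↔ v ∈ xs ∧ 0 < f v := by
  rw [← List.count_pos_iff, pvCanon_count]
  by_cases hv : v ∈ xs <;> simp [hv] <;> omega

theorem pvSorted_eq_canon (xs : List Int) :
    PySem.List.sorted xs (fun x => x) true = pvCanon xs (fun d => (xs.count d : Int)) := by
  apply List.Perm.eq_of_pairwise (le := (· ≥ ·)) (fun a b _ _ h1 h2 => le_antisymm h2 h1)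
  · exact PySem.List.sorted_pairwise_rev xs (fun x => x)
  · exact pvCanon_pairwise _ _
  · refine ((PySem.List.sorted_perm _ _ _).trans (List.perm_iff_count.mpr (fun v => ?_)))
    rw [pvCanon_count]
    by_cases hv : v ∈ xs <;> simp [hv, List.count_eq_zero_of_not_mem]


theorem pvRangeRev (n : Nat) (h : 0 < n) :
    PySem.List.pyRange ((n : Int) - 1) (-1) (-1) = ((List.range n).reverse).map (fun i : Nat => (i : Int)) := by
  simp only [PySem.List.pyRange]
  norm_num
  rw [if_pos h]
  apply List.ext_getElem
  · simp
  · intro i h1 h2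
    simp only [List.length_map, List.length_range, List.length_reverse] at h1 h2
    rw [List.getElem_reverse]
    simp only [List.getElem_map, List.getElem_range, List.length_map, List.length_range]
    push_cast; omega

theorem pvShift (zs : List Int) (a : Int) (q : Int → Bool) (idxs : List Int)
    (hb : ∀ i ∈ idxs, ∃ k : Nat, i = (k : Int) ∧ k < zs.length) :
    pvPopScan (zs ++ [a]) q idxs = (pvPopScan zs q idxs).map (fun r => (r.1, r.2 ++ [a])) := by
  induction idxs with
  | nil => simp [pvPopScan]
  | cons i rest ih =>
    rcases hb i (List.mem_cons_self ..) with ⟨k, rfl, hk⟩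
    rw [pvPopScan, pvPopScan]
    rw [PySem.List.pyGet?_natCast, PySem.List.pyGet?_natCast]
    rw [List.getElem?_append_left hk, List.getElem?_eq_getElem hk]
    simp only
    by_cases hq : q (zs[k])
    · rw [if_pos hq, if_pos hq]
      rw [PySem.List.pop?_natCast _ _ hk, PySem.List.pop?_natCast _ _ (by simp; omega)]
      simp [List.getElem_append_left hk, List.eraseIdx_append_of_lt_length hk]
    · rw [if_neg hq, if_neg hq, ih (fun j hj => hb j (List.mem_cons_of_mem _ hj))]

theorem pvScan_eq (rs : List Int) (q : Int → Bool) :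
    pvPopScan rs.reverse q (PySem.List.pyRange ((rs.length : Int) - 1) (-1) (-1))
      = (rs.find? q).map (fun m => (m, (rs.eraseP q).reverse)) := by
  induction rs with
  | nil =>
    have : PySem.List.pyRange ((([] : List Int).length : Int) - 1) (-1) (-1) = [] := by
      norm_num [PySem.List.pyRange]
    rw [this]
    simp [pvPopScan]
  | cons a t ih =>
    have hlen : (0:Nat) < (a :: t).length := by simp
    rw [pvRangeRev _ hlen]
    have : (List.range (a :: t).length).reverse = t.length :: (List.range t.length).reverse := by
      simp [List.range_succ]
    rw [this, List.map_cons, pvPopScan]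
    rw [PySem.List.pyGet?_natCast]
    have hlt : t.length < (a :: t).reverse.length := by simp
    rw [List.getElem?_eq_getElem hlt]
    have hgetlast : (a :: t).reverse[t.length] = a := by
      rw [List.getElem_reverse]; simp
    simp only [hgetlast]
    by_cases hq : q a
    · rw [if_pos hq, PySem.List.pop?_natCast _ _ hlt]
      have : (a :: t).reverse.eraseIdx t.length = t.reverse := by
        rw [List.reverse_cons, List.eraseIdx_append_of_length_le (by simp)]
        simp
      rw [this]
      simp [List.find?_cons, hq, List.eraseP_cons, hq]
    · rw [if_neg hq]
      have hshift : pvPopScan (t.reverse ++ [a]) q ((List.range t.length).reverse.map (fun i : Nat => (i : Int)))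
          = (pvPopScan t.reverse q ((List.range t.length).reverse.map (fun i : Nat => (i : Int)))).map (fun r => (r.1, r.2 ++ [a])) := by
        apply pvShift
        intro i hi
        rcases List.mem_map.mp hi with ⟨k, hk, rfl⟩
        exact ⟨k, rfl, by simpa using (List.mem_range.mp (List.mem_reverse.mp hk))⟩
      rw [show (a :: t).reverse = t.reverse ++ [a] by simp, hshift]
      by_cases ht : 0 < t.length
      · rw [← pvRangeRev _ ht, ih]
        simp [List.find?_cons, hq, List.eraseP_cons, hq]
        cases List.find? q t <;> simp
      · have : t = [] := by cases t <;> simp_all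
        subst this
        simp [pvPopScan, List.find?_cons, hq]

theorem pvFind_min (rs : List Int) (q : Int → Bool) (hp : rs.Pairwise (· ≤ ·)) (m : Int)
    (h : rs.find? q = some m) : q m ∧ m ∈ rs ∧ ∀ x ∈ rs, q x → m ≤ x := by
  induction rs with
  | nil => simp at h
  | cons a t ih =>
    rcases List.pairwise_cons.mp hp with ⟨ha, ht⟩
    by_cases hq : q a
    · simp only [List.find?_cons, hq] at h
      cases h
      exact ⟨hq, List.mem_cons_self .., fun x hx _ => by
        rcases List.mem_cons.mp hx with rfl | hx; exact le_rfl; exact ha x hx⟩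
    · rw [Bool.not_eq_true] at hq
      simp only [List.find?_cons, hq] at h
      rw [← Bool.not_eq_true] at hq
      rcases ih ht h with ⟨h1, h2, h3⟩
      exact ⟨h1, List.mem_cons_of_mem _ h2, fun x hx hqx => by
        rcases List.mem_cons.mp hx with rfl | hx; exact absurd hqx hq; exact h3 x hx hqx⟩

theorem pvErasePFind (rs : List Int) (q : Int → Bool) (m : Int)
    (h : rs.find? q = some m) : rs.eraseP q = rs.erase m := by
  induction rs with
  | nil => simp at h
  | cons a t ih =>
    by_cases hq : q a
    · simp only [List.find?_cons, hq] at h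
      cases h
      rw [List.eraseP_cons_of_pos hq, List.erase_cons_head]
    · rw [Bool.not_eq_true] at hq
      simp only [List.find?_cons, hq] at h
      rw [← Bool.not_eq_true] at hq
      have hqm : q m := (List.find?_some h)
      have hne : a ≠ m := fun hh => hq (hh ▸ hqm)
      rw [List.eraseP_cons_of_neg (by simpa using hq), List.erase_cons_tail, ih h]
      simpa using hne

theorem pvSumMod (ys : List Int) :
    ys.sum % 3 = (((ys.countP (fun x => x % 3 == 1)) : Int) + 2 * ((ys.countP (fun x => x % 3 == 2)) : Int)) % 3 := by
  induction ys with
  | nil => simp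
  | cons a t ih =>
    rw [List.sum_cons, List.countP_cons, List.countP_cons]
    have h3 : a % 3 = 0 ∨ a % 3 = 1 ∨ a % 3 = 2 := by omega
    rcases h3 with h | h | h <;> simp [h] <;> push_cast <;> omega

theorem pvCountPSplit (ys : List Int) :
    ys.countP (fun x => x % 3 != 0) = ys.countP (fun x => x % 3 == 1) + ys.countP (fun x => x % 3 == 2) := by
  induction ys with
  | nil => simp
  | cons a t ih =>
    rw [List.countP_cons, List.countP_cons, List.countP_cons]
    have h3 : a % 3 = 0 ∨ a % 3 = 1 ∨ a % 3 = 2 := by omega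
    rcases h3 with h | h | h <;> simp [h, ih] <;> omega

theorem pvGetD_fold_insert (ks : List Int) (g : Int → Int) (d0 : PySem.Dict Int Int) (v : Int) :
    (ks.foldl (fun d k => d.insert k (g k)) d0).getD v 0 = if v ∈ ks then g v else d0.getD v 0 := by
  induction ks generalizing d0 with
  | nil => simp
  | cons a t ih =>
    rw [List.foldl_cons, ih]
    by_cases hv : v ∈ t
    · simp [hv]
    · by_cases hva : v = a
      · subst hva
        simp [hv, PySem.Dict.getD, PySem.Dict.get?_insert_self]
      · simp [hv, hva, PySem.Dict.getD, PySem.Dict.get?_insert_of_ne _ _ hva]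

theorem pvGetD_fold_modify (ds : List Int) (d0 : PySem.Dict Int Int) (v : Int) :
    (ds.foldl (fun d k => d.modify k 0 (· - 1)) d0).getD v 0 = d0.getD v 0 - (ds.count v : Int) := by
  induction ds generalizing d0 with
  | nil => simp
  | cons a t ih =>
    rw [List.foldl_cons, ih, List.count_cons]
    by_cases hva : v = a
    · subst hva
      simp [PySem.Dict.modify, PySem.Dict.getD, PySem.Dict.get?_insert_self]
      push_cast
      ring
    · simp [hva, PySem.Dict.modify, PySem.Dict.getD, PySem.Dict.get?_insert_of_ne _ _ hva, Ne.symm hva]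

theorem pvJoinFlatten (l : List (List Char)) : PySem.Chars.join [] l = l.flatten := by
  induction l with
  | nil => rfl
  | cons a t ih =>
    cases t with
    | nil => simp [PySem.Chars.join, List.intercalate, List.intersperse]
    | cons b t' =>
      rw [PySem.Chars.join_cons_cons, ih]
      simp

theorem pvOutEq (K : List Int) (g : Int → Nat) :
    (List.map PySem.Int.toChars (K.flatMap (fun d => List.replicate (g d) d))).flatten
      = (K.map (fun d => (List.replicate (g d) (PySem.Int.toChars d)).flatten)).flatten := by
  induction K with
  | nil => simp
  | cons a t ih =>
    rw [List.flatMap_cons, List.map_append, List.flatten_append, ih, List.map_cons, List.flatten_cons, List.map_replicate]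

theorem pvLoopA_done (fuel : Nat) (ys : List Int) (h : PySem.Int.mod ys.sum 3 = 0) :
    pvLoopA (fuel + 1) ys = ys := by
  have hd : (3:Int) ∣ ys.sum := (PySem.Int.mod_eq_zero_iff_dvd _ _).mp h
  rw [pvLoopA]
  by_cases he : ys.isEmpty <;> simp [he, hd]

theorem pvRemoveOne (ys : List Int) (q : Int → Bool) (m : Int)
    (hp : ys.Pairwise (· ≥ ·)) (hfind : ys.reverse.find? q = some m) :
    pvPopScan ys q (PySem.List.pyRange ((ys.length : Int) - 1) (-1) (-1))
        = some (m, (ys.reverse.erase m).reverse) ∧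
    q m = true ∧ m ∈ ys ∧ (∀ x ∈ ys, q x = true → m ≤ x) ∧
    ((ys.reverse.erase m).reverse).Pairwise (· ≥ ·) ∧
    (∀ v, ((ys.reverse.erase m).reverse).count v = ys.count v - if v = m then 1 else 0) ∧
    ((ys.reverse.erase m).reverse).sum = ys.sum - m := by
  have hprev : ys.reverse.Pairwise (· ≤ ·) := by
    rw [List.pairwise_reverse]; exact hp
  have hmin := pvFind_min ys.reverse q hprev m hfind
  have hmem : m ∈ ys := List.mem_reverse.mp hmin.2.1
  have hscan : pvPopScan ys q (PySem.List.pyRange ((ys.length : Int) - 1) (-1) (-1))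
      = some (m, (ys.reverse.erase m).reverse) := by
    have h := pvScan_eq ys.reverse q
    rw [List.reverse_reverse, List.length_reverse] at h
    rw [h, hfind, pvErasePFind _ _ _ hfind]
    rfl
  refine ⟨hscan, hmin.1, hmem, ?_, ?_, ?_, ?_⟩
  · intro x hx hqx
    exact hmin.2.2 x (List.mem_reverse.mpr hx) hqx
  · rw [List.pairwise_reverse]
    exact (List.Pairwise.erase m hprev).imp (fun h => h)
  · intro v
    rw [List.count_reverse, List.count_erase, List.count_reverse]
    by_cases hv : v = m <;> simp [hv, Ne.symm]
  · have hperm := List.perm_cons_erase (List.mem_reverse.mpr hmem)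
    have := hperm.sum_eq
    have h1 : ((ys.reverse.erase m).reverse).sum = (ys.reverse.erase m).sum := by
      exact (List.reverse_perm _).sum_eq
    have h2 : ys.reverse.sum = ys.sum := (List.reverse_perm _).sum_eq
    simp at this
    omega

theorem pvCanon_head (xs : List Int) (f : Int → Int) (hnn : ∀ d ∈ xs, 0 ≤ d) :
    ((pvCanon xs f) = [] ∨ (pvCanon xs f).head? = some 0)
      ↔ ∀ d ∈ pvK xs, d = 0 ∨ f d ≤ 0 := by
  constructor
  · rintro (hc | hc) d hd
    · by_cases hfd : 0 < f d
      · exact absurd ((pvCanon_mem xs f d).mpr ⟨(pvK_mem xs d).mp hd, hfd⟩) (by simp [hc])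
      · exact Or.inr (by omega)
    · rcases hzs : pvCanon xs f with _ | ⟨h0, t⟩
      · simp [hzs] at hc
      · rw [hzs] at hc
        simp at hc
        subst hc
        by_cases hd0 : d = 0
        · exact Or.inl hd0
        · by_cases hfd : 0 < f d
          · have hdm : d ∈ pvCanon xs f := (pvCanon_mem xs f d).mpr ⟨(pvK_mem xs d).mp hd, hfd⟩
            rw [hzs] at hdm
            rcases List.mem_cons.mp hdm with rfl | hdm
            · exact Or.inl rfl
            · have := List.rel_of_pairwise_cons (hzs ▸ pvCanon_pairwise xs f) hdm
              have hdnn := hnn d ((pvK_mem xs d).mp hd)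
              omega
          · exact Or.inr (by omega)
  · intro hall
    rcases hzs : pvCanon xs f with _ | ⟨h0, t⟩
    · exact Or.inl rfl
    · right
      have hh : h0 ∈ pvCanon xs f := by rw [hzs]; exact List.mem_cons_self ..
      rcases (pvCanon_mem xs f h0).mp hh with ⟨hmem, hpos⟩
      rcases hall h0 ((pvK_mem xs h0).mpr hmem) with rfl | hle
      · simp [hzs]
      · omega

theorem pvFinal (xs : List Int) (hnn : ∀ d ∈ xs, 0 ≤ d) (f : Int → Int) (cnt : PySem.Dict Int Int)
    (hf : ∀ d ∈ pvK xs, cnt.getD d 0 = f d) (hf0 : ∀ d ∈ pvK xs, 0 ≤ f d) :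
    (if (pvCanon xs f).isEmpty || (PySem.List.pyGet? (pvCanon xs f) 0 == some 0) then (0:Int)
     else
       match PySem.Int.ofChars? (PySem.Chars.join [] ((PySem.List.sorted (pvCanon xs f) (fun x => x) true).map PySem.Int.toChars) ++ ['0']) with
       | some n => n
       | none => 0)
    = (if (pvK xs).all (fun d => d == 0 || (cnt.getD d 0 == 0)) then 0
       else
         match PySem.Int.ofChars? (PySem.Chars.join [] ((pvK xs).map (fun d => PySem.Chars.join [] (List.replicate (cnt.getD d 0).toNat (PySem.Int.toChars d)))) ++ ['0']) with
         | some n => n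
         | none => 0) := by
  have hget0 : PySem.List.pyGet? (pvCanon xs f) 0 = (pvCanon xs f).head? := by
    have h1 := PySem.List.pyGet?_natCast (pvCanon xs f) 0
    rw [← List.head?_eq_getElem?] at h1
    simpa using h1
  have hcond : ((pvCanon xs f).isEmpty || (PySem.List.pyGet? (pvCanon xs f) 0 == some 0))
      = (pvK xs).all (fun d => d == 0 || (cnt.getD d 0 == 0)) := by
    rw [Bool.eq_iff_iff]
    rw [hget0]
    simp only [Bool.or_eq_true, List.isEmpty_iff, beq_iff_eq, List.all_eq_true]
    rw [pvCanon_head xs f hnn]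
    constructor
    · intro h d hd
      rcases h d hd with rfl | hle
      · simp
      · have := hf0 d hd
        simp [hf d hd]
        omega
    · intro h d hd
      rcases (by simpa using h d hd : d = 0 ∨ cnt.getD d 0 = 0) with rfl | hz
      · exact Or.inl rfl
      · exact Or.inr (by rw [← hf d hd, hz])
  rw [hcond]
  by_cases hb : ((pvK xs).all (fun d => d == 0 || (cnt.getD d 0 == 0))) = true
  · rw [if_pos hb, if_pos hb]
  · rw [if_neg hb, if_neg hb]
    have hsame : PySem.Chars.join [] ((PySem.List.sorted (pvCanon xs f) (fun x => x) true).map PySem.Int.toChars)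
        = PySem.Chars.join [] ((pvK xs).map (fun d => PySem.Chars.join [] (List.replicate (cnt.getD d 0).toNat (PySem.Int.toChars d)))) := by
      rw [PySem.List.sorted_rev_eq_self_of_pairwise _ _ (pvCanon_pairwise xs f)]
      rw [pvJoinFlatten, pvJoinFlatten]
      have hmapeq : (pvK xs).map (fun d => PySem.Chars.join [] (List.replicate (cnt.getD d 0).toNat (PySem.Int.toChars d)))
          = (pvK xs).map (fun d => (List.replicate (f d).toNat (PySem.Int.toChars d)).flatten) := by
        apply List.map_congr_left
        intro d hd
        rw [pvJoinFlatten, hf d hd]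
      rw [hmapeq]
      exact pvOutEq (pvK xs) (fun d => (f d).toNat)
    rw [hsame]

theorem pvZsA (xs : List Int) (hc : PySem.Int.mod xs.sum 3 = 0) :
    pvLoopA ((PySem.List.sorted xs (fun x => x) true).length + 1) (PySem.List.sorted xs (fun x => x) true)
      = pvCanon xs (fun d => (xs.count d : Int)) := by
  have hsum : (PySem.List.sorted xs (fun x => x) true).sum = xs.sum :=
    (PySem.List.sorted_perm xs (fun x => x) true).sum_eq
  rw [pvLoopA_done _ _ (by rw [hsum]; exact hc)]
  have h := pvSorted_eq_canon xs
  simpa using h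

theorem pvCountToNat (xs : List Int) (v b : Int) (hb : b ∈ xs) :
    ((if v ∈ xs then ((xs.count v : Int) - if v = b then 1 else 0).toNat else 0) : Nat)
      = xs.count v - if v = b then 1 else 0 := by
  by_cases hv : v ∈ xs
  · rcases eq_or_ne v b with rfl | hne
    · have : 1 ≤ xs.count v := List.count_pos_iff.mpr hv
      simp [hv]
    · simp [hv, hne]
  · have h0 : xs.count v = 0 := List.count_eq_zero_of_not_mem hv
    have hne : v ≠ b := fun h => hv (h ▸ hb)
    simp [hv, h0, hne]

theorem pvZsB (xs : List Int) (c b : Int) (bt : List Int)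
    (hc : PySem.Int.mod xs.sum 3 = c) (hc0 : ¬ c = 0)
    (hbad : PySem.List.sorted (xs.filter (fun d => PySem.Int.mod d 3 == c)) (fun x => x) false = b :: bt) :
    pvLoopA ((PySem.List.sorted xs (fun x => x) true).length + 1) (PySem.List.sorted xs (fun x => x) true)
      = pvCanon xs (fun d => (xs.count d : Int) - if d = b then 1 else 0) := by
  set q : Int → Bool := fun v => PySem.Int.mod v 3 == c with hq
  set ds := PySem.List.sorted xs (fun x => x) true with hds
  have hp : ds.Pairwise (· ≥ ·) := PySem.List.sorted_pairwise_rev xs (fun x => x)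
  have hperm : ds.Perm xs := PySem.List.sorted_perm xs (fun x => x) true
  have hsum : ds.sum = xs.sum := hperm.sum_eq
  have hqiff : ∀ v : Int, q v = true ↔ v % 3 = c := by
    intro v
    have h := PySem.Int.mod_eq_emod_of_pos (a := v) (b := 3) (by norm_num)
    rw [hq]
    simp [h]
  have hcx : xs.sum % 3 = c := by
    rw [← PySem.Int.mod_eq_emod_of_pos (b := 3) (by norm_num), hc]
  -- the head of bad is the smallest digit of residue c
  have hbmem : b ∈ xs.filter q := by
    have : b ∈ PySem.List.sorted (xs.filter q) (fun x => x) false := by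
      rw [hbad]; exact List.mem_cons_self ..
    exact (PySem.List.mem_sorted _ _ _ _).mp this
  have hbx : b ∈ xs := (List.mem_filter.mp hbmem).1
  have hbq : q b = true := (List.mem_filter.mp hbmem).2
  have hbmin : ∀ y ∈ xs.filter q, b ≤ y := by
    have := PySem.List.key_head_sorted_le (xs.filter q) (fun x => x) hbad
    simpa using this
  -- the loop's backwards scan finds the same digit
  have hfs : (ds.reverse.find? q).isSome := by
    rw [List.find?_isSome]
    exact ⟨b, List.mem_reverse.mpr (hperm.mem_iff.mpr hbx), hbq⟩
  obtain ⟨m1, hfind⟩ := Option.isSome_iff_exists.mp hfs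
  obtain ⟨hscan, hqm, hmmem, hmmin, hpair1, hcount1, hsum1⟩ := pvRemoveOne ds q m1 hp hfind
  have hm1b : m1 = b := by
    apply le_antisymm
    · exact hmmin b (hperm.mem_iff.mpr hbx) hbq
    · exact hbmin m1 (List.mem_filter.mpr ⟨hperm.mem_iff.mp hmmem, hqm⟩)
  rw [hm1b] at hscan hqm hmmem hmmin hpair1 hcount1 hsum1
  have hne : ¬ ds.isEmpty = true := by
    simp only [List.isEmpty_iff]
    intro h
    rw [h] at hmmem
    exact absurd hmmem (List.not_mem_nil)
  have hmodds : PySem.Int.mod ds.sum 3 = c := by rw [hsum, hc]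
  rcases hlen : ds.length with _ | k
  · exact absurd (List.length_eq_zero_iff.mp hlen ▸ hmmem) (List.not_mem_nil)
  · rw [pvLoopA]
    rw [if_neg hne]
    simp only [hmodds, if_neg hc0]
    rw [← hq, hscan]
    have hz : PySem.Int.mod ((ds.reverse.erase b).reverse).sum 3 = 0 := by
      rw [PySem.Int.mod_eq_emod_of_pos (by norm_num), hsum1, hsum]
      have hbr : b % 3 = c := (hqiff b).mp hbq
      omega
    rw [hlen]
    show pvLoopA (k + 1) ((ds.reverse.erase b).reverse) = _
    rw [pvLoopA_done _ _ hz]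
    -- identify the list with the canonical expansion
    apply pvDescUnique _ hpair1 (pvCanon_pairwise _ _)
    apply List.perm_iff_count.mpr
    intro v
    rw [hcount1 v, pvCanon_count, pvCountToNat xs v b hbx, hperm.count_eq]

theorem pvModIff (c : Int) : ∀ v : Int, ((PySem.Int.mod v 3 == c) = true) ↔ v % 3 = c := by
  intro v
  have h := PySem.Int.mod_eq_emod_of_pos (a := v) (b := 3) (by norm_num)
  simp [h]

theorem pvModNeIff : ∀ v : Int, ((PySem.Int.mod v 3 != 0) = true) ↔ ¬ v % 3 = 0 := by
  intro v
  have h := PySem.Int.mod_eq_emod_of_pos (a := v) (b := 3) (by norm_num)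
  simp [h]

theorem pvTwo (xs : List Int) (c : Int)
    (hc : PySem.Int.mod xs.sum 3 = c) (hc0 : ¬ c = 0)
    (hbad : xs.filter (fun d => PySem.Int.mod d 3 == c) = []) :
    2 ≤ (PySem.List.sorted (xs.filter (fun d => PySem.Int.mod d 3 != 0)) (fun x => x) false).length := by
  rw [PySem.List.length_sorted, ← List.countP_eq_length_filter]
  have hcx : xs.sum % 3 = c := by
    rw [← PySem.Int.mod_eq_emod_of_pos (b := 3) (by norm_num), hc]
  have hcb : 0 ≤ c ∧ c < 3 := by
    constructor
    · rw [← hc]; exact PySem.Int.mod_nonneg _ (by norm_num)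
    · rw [← hc]; exact PySem.Int.mod_lt _ (by norm_num)
  have hzero : xs.countP (fun d => PySem.Int.mod d 3 == c) = 0 := by
    rw [List.countP_eq_length_filter, hbad]
    rfl
  have hz2 : xs.countP (fun x => x % 3 == c) = 0 := by
    rw [← hzero]
    apply List.countP_congr
    intro x _
    simp only [beq_iff_eq, pvModIff c x, decide_eq_true_eq]
  have hq' : xs.countP (fun d => PySem.Int.mod d 3 != 0) = xs.countP (fun x => x % 3 != 0) := by
    apply List.countP_congr
    intro x _
    simp [pvModNeIff x]
  rw [hq', pvCountPSplit xs]
  have hsummod := pvSumMod xs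
  rcases (by omega : c = 1 ∨ c = 2) with rfl | rfl
  · rw [show ((fun x => x % 3 == (1:Int))) = (fun x : Int => x % 3 == 1) from rfl] at hz2
    omega
  · omega

theorem pvZsC (xs : List Int) (c m1 m2 : Int) (rest : List Int)
    (hc : PySem.Int.mod xs.sum 3 = c) (hc0 : ¬ c = 0)
    (hbad : xs.filter (fun d => PySem.Int.mod d 3 == c) = [])
    (hL : PySem.List.sorted (xs.filter (fun d => PySem.Int.mod d 3 != 0)) (fun x => x) false = m1 :: m2 :: rest) :
    pvLoopA ((PySem.List.sorted xs (fun x => x) true).length + 1) (PySem.List.sorted xs (fun x => x) true)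
      = pvCanon xs (fun d => (xs.count d : Int) - ((if d = m1 then 1 else 0) + (if d = m2 then 1 else 0))) := by
  set q : Int → Bool := fun v => PySem.Int.mod v 3 != 0 with hq
  set ds := PySem.List.sorted xs (fun x => x) true with hds
  have hp : ds.Pairwise (· ≥ ·) := PySem.List.sorted_pairwise_rev xs (fun x => x)
  have hperm : ds.Perm xs := PySem.List.sorted_perm xs (fun x => x) true
  have hsum : ds.sum = xs.sum := hperm.sum_eq
  have hcx : xs.sum % 3 = c := by
    rw [← PySem.Int.mod_eq_emod_of_pos (b := 3) (by norm_num), hc]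
  have hcb : 0 ≤ c ∧ c < 3 := by
    constructor
    · rw [← hc]; exact PySem.Int.mod_nonneg _ (by norm_num)
    · rw [← hc]; exact PySem.Int.mod_lt _ (by norm_num)
  have hnoc : ∀ x ∈ xs, ¬ x % 3 = c := by
    intro x hx
    have := List.filter_eq_nil_iff.mp hbad x hx
    simpa [pvModIff c x] using this
  -- facts about the two smallest non-multiples of 3
  have hLp : (m1 :: m2 :: rest).Pairwise (· ≤ ·) := by
    have := PySem.List.sorted_pairwise (xs.filter q) (fun x => x)
    rw [hL] at this
    simpa using this
  have hm1mem : m1 ∈ xs.filter q := by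
    have : m1 ∈ PySem.List.sorted (xs.filter q) (fun x => x) false := by
      rw [hL]; exact List.mem_cons_self ..
    exact (PySem.List.mem_sorted _ _ _ _).mp this
  have hm2mem : m2 ∈ xs.filter q := by
    have : m2 ∈ PySem.List.sorted (xs.filter q) (fun x => x) false := by
      rw [hL]; exact List.mem_cons_of_mem _ (List.mem_cons_self ..)
    exact (PySem.List.mem_sorted _ _ _ _).mp this
  have hm1x : m1 ∈ xs := (List.mem_filter.mp hm1mem).1
  have hm2x : m2 ∈ xs := (List.mem_filter.mp hm2mem).1
  have hm1q : q m1 = true := (List.mem_filter.mp hm1mem).2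
  have hm2q : q m2 = true := (List.mem_filter.mp hm2mem).2
  have hm1min : ∀ y ∈ xs.filter q, m1 ≤ y := by
    have := PySem.List.key_head_sorted_le (xs.filter q) (fun x => x) hL
    simpa using this
  -- count of any q-digit in the filter equals its count in xs
  have hcntfil : ∀ v : Int, q v = true → (xs.filter q).count v = xs.count v := by
    intro v hv
    rw [List.count_filter]
    simp [hv]
  have hcntL : ∀ v : Int, (m1 :: m2 :: rest).count v = (xs.filter q).count v := by
    intro v
    have : (PySem.List.sorted (xs.filter q) (fun x => x) false).Perm (xs.filter q) :=
      PySem.List.sorted_perm _ _ _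
    rw [← hL]
    exact this.count_eq v
  have hm2cnt : (1 + if m2 = m1 then 1 else 0 : Nat) ≤ xs.count m2 := by
    have h1 : (1 + if m2 = m1 then 1 else 0 : Nat) ≤ (m1 :: m2 :: rest).count m2 := by
      rcases eq_or_ne m2 m1 with rfl | hne
      · simp [List.count_cons]
      · simp [List.count_cons, hne, Ne.symm hne]
    have h2 := hcntL m2
    have h3 := hcntfil m2 hm2q
    omega
  -- the first scan (residue c) finds nothing
  have hfc : ds.reverse.find? (fun v => PySem.Int.mod v 3 == c) = none := by
    rw [List.find?_eq_none]
    intro x hx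
    have hxx : x ∈ xs := hperm.mem_iff.mp (List.mem_reverse.mp hx)
    simp only [ne_eq]
    intro hcon
    exact hnoc x hxx ((pvModIff c x).mp hcon)
  have hscanc : pvPopScan ds (fun v => PySem.Int.mod v 3 == c) (PySem.List.pyRange ((ds.length : Int) - 1) (-1) (-1)) = none := by
    have h := pvScan_eq ds.reverse (fun v => PySem.Int.mod v 3 == c)
    rw [List.reverse_reverse, List.length_reverse] at h
    rw [h, hfc]
    rfl
  -- first q-removal: finds m1
  have hfs1 : (ds.reverse.find? q).isSome := by
    rw [List.find?_isSome]
    exact ⟨m1, List.mem_reverse.mpr (hperm.mem_iff.mpr hm1x), hm1q⟩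
  obtain ⟨m1f, hfind1⟩ := Option.isSome_iff_exists.mp hfs1
  obtain ⟨hscan1, hq1, hmem1, hmin1, hpair1, hcount1, hsum1⟩ := pvRemoveOne ds q m1f hp hfind1
  have hm1eq : m1f = m1 := by
    apply le_antisymm
    · exact hmin1 m1 (hperm.mem_iff.mpr hm1x) hm1q
    · exact hm1min m1f (List.mem_filter.mpr ⟨hperm.mem_iff.mp hmem1, hq1⟩)
  rw [hm1eq] at hscan1 hq1 hmem1 hmin1 hpair1 hcount1 hsum1
  set ys1 : List Int := (ds.reverse.erase m1).reverse with hys1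
  -- second q-removal: finds m2
  have hm2ys1 : m2 ∈ ys1 := by
    apply List.count_pos_iff.mp
    rw [hcount1 m2, hperm.count_eq]
    omega
  have hfs2 : (ys1.reverse.find? q).isSome := by
    rw [List.find?_isSome]
    exact ⟨m2, List.mem_reverse.mpr hm2ys1, hm2q⟩
  obtain ⟨m2f, hfind2⟩ := Option.isSome_iff_exists.mp hfs2
  obtain ⟨hscan2, hq2, hmem2, hmin2, hpair2, hcount2, hsum2⟩ := pvRemoveOne ys1 q m2f hpair1 hfind2
  have hm2eq : m2f = m2 := by
    apply le_antisymm
    · exact hmin2 m2 hm2ys1 hm2q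
    · -- m2f is a q-element of xs minus one m1; it lies in m2 :: rest, whose head is minimal
      have hm2fx : m2f ∈ xs := by
        have h1 : m2f ∈ ds.reverse.erase m1 := List.mem_reverse.mp (hys1 ▸ hmem2)
        exact hperm.mem_iff.mp (List.mem_reverse.mp (List.erase_subset h1))
      have htailmin : ∀ y ∈ m2 :: rest, m2 ≤ y := by
        intro y hy
        rcases List.mem_cons.mp hy with rfl | hy
        · exact le_rfl
        · exact List.rel_of_pairwise_cons (List.pairwise_cons.mp hLp).2 hy
      apply htailmin
      by_cases hfm1 : m2f = m1
      · -- two copies of m1 must exist, so m1 also occurs in the tail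
        have hcm1 : 2 ≤ xs.count m1 := by
          have hpos := List.count_pos_iff.mpr hmem2
          rw [hfm1] at hpos
          rw [hcount1 m1, hperm.count_eq] at hpos
          simp at hpos
          omega
        have : 1 ≤ (m2 :: rest).count m1 := by
          have hLc := hcntL m1
          have hfc1 := hcntfil m1 hm1q
          rw [show (m1 :: m2 :: rest).count m1 = (m2 :: rest).count m1 + 1 by
            simp [List.count_cons]] at hLc
          omega
        rw [hfm1]
        exact List.count_pos_iff.mp this
      · have : m2f ∈ m1 :: m2 :: rest := by
          apply List.count_pos_iff.mp
          rw [hcntL m2f, hcntfil m2f hq2]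
          exact List.count_pos_iff.mpr hm2fx
        rcases List.mem_cons.mp this with h | h
        · exact absurd h hfm1
        · exact h
  rw [hm2eq] at hscan2 hq2 hmem2 hmin2 hpair2 hcount2 hsum2
  -- now evaluate the loop
  have hne : ¬ ds.isEmpty = true := by
    simp only [List.isEmpty_iff]
    intro h
    rw [h] at hmem1
    exact absurd hmem1 (List.not_mem_nil)
  have hmodds : PySem.Int.mod ds.sum 3 = c := by rw [hsum, hc]
  rcases hlen : ds.length with _ | k
  · exact absurd (List.length_eq_zero_iff.mp hlen ▸ hmem1) (List.not_mem_nil)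
  · rw [pvLoopA, if_neg hne]
    simp only [hmodds, if_neg hc0]
    rw [hscanc, ← hq, hscan1]
    show pvLoopA (k + 1)
        (match pvPopScan ys1 q (PySem.List.pyRange ((ys1.length : Int) - 1) (-1) (-1)) with
         | some (_, r) => r
         | none => ys1) = _
    rw [hscan2]
    show pvLoopA (k + 1) ((ys1.reverse.erase m2).reverse) = _
    have hz : PySem.Int.mod ((ys1.reverse.erase m2).reverse).sum 3 = 0 := by
      rw [PySem.Int.mod_eq_emod_of_pos (by norm_num), hsum2, hsum1, hsum]
      have h1 : ¬ m1 % 3 = 0 := (pvModNeIff m1).mp hm1q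
      have h2 : ¬ m2 % 3 = 0 := (pvModNeIff m2).mp hm2q
      have h3 := hnoc m1 hm1x
      have h4 := hnoc m2 hm2x
      omega
    rw [pvLoopA_done _ _ hz]
    apply pvDescUnique _ hpair2 (pvCanon_pairwise _ _)
    apply List.perm_iff_count.mpr
    intro v
    rw [hcount2 v, hcount1 v, hperm.count_eq, pvCanon_count]
    have hc2 := hm2cnt
    have hc1 : 1 ≤ xs.count m1 := List.count_pos_iff.mpr hm1x
    by_cases hv : v ∈ xs
    · simp only [if_pos hv]
      rcases eq_or_ne v m1 with rfl | hv1 <;> rcases eq_or_ne v m2 with rfl | hv2 <;>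
        simp_all <;> omega
    · have h0 : xs.count v = 0 := List.count_eq_zero_of_not_mem hv
      have hn1 : ¬ v = m1 := fun h => hv (h ▸ hm1x)
      have hn2 : ¬ v = m2 := fun h => hv (h ▸ hm2x)
      simp [hv, h0, hn1, hn2]

theorem pvCountSingle (d b : Int) : (List.count d [b] : Int) = if d = b then 1 else 0 := by
  simp only [List.count_cons, List.count_nil, beq_iff_eq]
  by_cases h : d = b
  · simp [h]
  · simp [h]
    exact fun hh => h hh.symm

theorem pvCountPair (d m1 m2 : Int) :
    (List.count d [m1, m2] : Int) = (if d = m1 then 1 else 0) + (if d = m2 then 1 else 0) := by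
  simp only [List.count_cons, List.count_nil, beq_iff_eq]
  by_cases h1 : d = m1 <;> by_cases h2 : d = m2 <;> simp [h1, h2] <;> omega

-- the body of both ports after the common `remove?` step agree
theorem pvMain (xs : List Int) (hnn : ∀ d ∈ xs, 0 ≤ d) :
    (if (pvLoopA ((PySem.List.sorted xs (fun x => x) true).length + 1) (PySem.List.sorted xs (fun x => x) true)).isEmpty
        || (PySem.List.pyGet? (pvLoopA ((PySem.List.sorted xs (fun x => x) true).length + 1) (PySem.List.sorted xs (fun x => x) true)) 0 == some 0) then (0:Int)
     else
       match PySem.Int.ofChars? (PySem.Chars.join [] ((PySem.List.sorted (pvLoopA ((PySem.List.sorted xs (fun x => x) true).length + 1) (PySem.List.sorted xs (fun x => x) true)) (fun x => x) true).map PySem.Int.toChars) ++ ['0']) with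
       | some n => n
       | none => 0)
    =
    (if (PySem.List.sorted (PySem.Set.ofList xs) (fun x => x) true).all
          (fun d => d == 0 ||
            ((if PySem.Int.mod xs.sum 3 = 0 then
                (PySem.List.sorted (PySem.Set.ofList xs) (fun x => x) true).foldl (fun d k => d.insert k ((PySem.List.count xs k : Int))) PySem.Dict.empty
              else
                (if !(PySem.List.sorted (xs.filter (fun d => PySem.Int.mod d 3 == PySem.Int.mod xs.sum 3)) (fun x => x) false).isEmpty
                 then (PySem.List.sorted (xs.filter (fun d => PySem.Int.mod d 3 == PySem.Int.mod xs.sum 3)) (fun x => x) false).take 1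
                 else (PySem.List.sorted (xs.filter (fun d => PySem.Int.mod d 3 != 0)) (fun x => x) false).take 2).foldl
                  (fun d k => d.modify k 0 (· - 1))
                  ((PySem.List.sorted (PySem.Set.ofList xs) (fun x => x) true).foldl (fun d k => d.insert k ((PySem.List.count xs k : Int))) PySem.Dict.empty)).getD d 0 == 0)) then (0:Int)
     else
       match PySem.Int.ofChars? (PySem.Chars.join [] ((PySem.List.sorted (PySem.Set.ofList xs) (fun x => x) true).map
          (fun d => PySem.Chars.join [] (List.replicate ((if PySem.Int.mod xs.sum 3 = 0 then
                (PySem.List.sorted (PySem.Set.ofList xs) (fun x => x) true).foldl (fun d k => d.insert k ((PySem.List.count xs k : Int))) PySem.Dict.empty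
              else
                (if !(PySem.List.sorted (xs.filter (fun d => PySem.Int.mod d 3 == PySem.Int.mod xs.sum 3)) (fun x => x) false).isEmpty
                 then (PySem.List.sorted (xs.filter (fun d => PySem.Int.mod d 3 == PySem.Int.mod xs.sum 3)) (fun x => x) false).take 1
                 else (PySem.List.sorted (xs.filter (fun d => PySem.Int.mod d 3 != 0)) (fun x => x) false).take 2).foldl
                  (fun d k => d.modify k 0 (· - 1))
                  ((PySem.List.sorted (PySem.Set.ofList xs) (fun x => x) true).foldl (fun d k => d.insert k ((PySem.List.count xs k : Int))) PySem.Dict.empty)).getD d 0).toNat (PySem.Int.toChars d)))) ++ ['0']) with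
       | some n => n
       | none => 0) := by
  have hcnt0 : ∀ v ∈ pvK xs,
      ((PySem.List.sorted (PySem.Set.ofList xs) (fun x => x) true).foldl (fun d k => d.insert k ((PySem.List.count xs k : Int))) PySem.Dict.empty).getD v 0
        = (xs.count v : Int) := by
    intro v hv
    rw [pvGetD_fold_insert]
    rw [show PySem.List.sorted (PySem.Set.ofList xs) (fun x => x) true = pvK xs from rfl, if_pos hv, PySem.List.count_eq]
  by_cases hcz : PySem.Int.mod xs.sum 3 = 0
  · rw [pvZsA xs hcz]
    rw [if_pos hcz]
    exact pvFinal xs hnn (fun d => (xs.count d : Int)) _ hcnt0 (fun d _ => by positivity)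
  · rw [if_neg hcz]
    rcases hbad : PySem.List.sorted (xs.filter (fun d => PySem.Int.mod d 3 == PySem.Int.mod xs.sum 3)) (fun x => x) false with _ | ⟨b, bt⟩
    · -- no digit of residue c: drop the two smallest non-multiples of 3
      have hfilnil : xs.filter (fun d => PySem.Int.mod d 3 == PySem.Int.mod xs.sum 3) = [] :=
        (PySem.List.sorted_eq_nil_iff _ _ _).mp hbad
      have htwo := pvTwo xs _ rfl hcz hfilnil
      rcases hL : PySem.List.sorted (xs.filter (fun d => PySem.Int.mod d 3 != 0)) (fun x => x) false with _ | ⟨m1, L1⟩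
      · rw [hL] at htwo; simp at htwo
      rcases L1 with _ | ⟨m2, rest⟩
      · rw [hL] at htwo; simp at htwo
      rw [pvZsC xs _ m1 m2 rest rfl hcz hfilnil hL]
      simp only [List.isEmpty_nil, Bool.not_true, Bool.false_eq_true, if_false,
        List.take_succ_cons, List.take_zero]
      -- membership/count facts for the two dropped digits
      have hm1mem : m1 ∈ xs.filter (fun d => PySem.Int.mod d 3 != 0) := by
        have : m1 ∈ PySem.List.sorted (xs.filter (fun d => PySem.Int.mod d 3 != 0)) (fun x => x) false := by
          rw [hL]; exact List.mem_cons_self ..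
        exact (PySem.List.mem_sorted _ _ _ _).mp this
      have hm2mem : m2 ∈ xs.filter (fun d => PySem.Int.mod d 3 != 0) := by
        have : m2 ∈ PySem.List.sorted (xs.filter (fun d => PySem.Int.mod d 3 != 0)) (fun x => x) false := by
          rw [hL]; exact List.mem_cons_of_mem _ (List.mem_cons_self ..)
        exact (PySem.List.mem_sorted _ _ _ _).mp this
      have hm1x : m1 ∈ xs := (List.mem_filter.mp hm1mem).1
      have hm2x : m2 ∈ xs := (List.mem_filter.mp hm2mem).1
      have hm2cnt : (1 + if m2 = m1 then 1 else 0 : Nat) ≤ xs.count m2 := by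
        have h1 : (1 + if m2 = m1 then 1 else 0 : Nat) ≤ (m1 :: m2 :: rest).count m2 := by
          rcases eq_or_ne m2 m1 with rfl | hne
          · simp [List.count_cons]
          · simp [List.count_cons, hne, Ne.symm hne]
        have h2 : (m1 :: m2 :: rest).count m2 = (xs.filter (fun d => PySem.Int.mod d 3 != 0)).count m2 := by
          rw [← hL]
          exact (PySem.List.sorted_perm _ _ _).count_eq m2
        have h3 : (xs.filter (fun d => PySem.Int.mod d 3 != 0)).count m2 = xs.count m2 := by
          rw [List.count_filter]
          simp [(List.mem_filter.mp hm2mem).2]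
          have h := (pvModNeIff m2).mp (List.mem_filter.mp hm2mem).2
          omega
        omega
      apply pvFinal xs hnn (fun d => (xs.count d : Int) - ((if d = m1 then 1 else 0) + (if d = m2 then 1 else 0)))
      · intro d hd
        rw [pvGetD_fold_modify, hcnt0 d hd]
        rw [pvCountPair]
      · intro d hd
        have h2 := hm2cnt
        have hc1 : 1 ≤ xs.count m1 := List.count_pos_iff.mpr hm1x
        by_cases h1 : d = m1 <;> by_cases hh : d = m2
        · have hmm : m2 = m1 := by rw [← h1, ← hh]
          rw [if_pos hmm] at h2
          rw [if_pos h1, if_pos hh, hh]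
          omega
        · rw [if_pos h1, if_neg hh, h1]
          omega
        · rw [if_neg h1, if_pos hh, hh]
          omega
        · rw [if_neg h1, if_neg hh]
          omega
    · -- a digit of residue c exists: drop the smallest one
      rw [pvZsB xs _ b bt rfl hcz hbad]
      simp only [List.isEmpty_cons, Bool.not_false, if_true, List.take_succ_cons, List.take_zero]
      have hbmem : b ∈ xs.filter (fun d => PySem.Int.mod d 3 == PySem.Int.mod xs.sum 3) := by
        have : b ∈ PySem.List.sorted (xs.filter (fun d => PySem.Int.mod d 3 == PySem.Int.mod xs.sum 3)) (fun x => x) false := by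
          rw [hbad]; exact List.mem_cons_self ..
        exact (PySem.List.mem_sorted _ _ _ _).mp this
      have hbx : b ∈ xs := (List.mem_filter.mp hbmem).1
      apply pvFinal xs hnn (fun d => (xs.count d : Int) - if d = b then 1 else 0)
      · intro d hd
        rw [pvGetD_fold_modify, hcnt0 d hd]
        rw [pvCountSingle]
      · intro d hd
        have hc1 : 1 ≤ xs.count b := List.count_pos_iff.mpr hbx
        by_cases h1 : d = b
        · rw [if_pos h1, h1]
          omega
        · rw [if_neg h1]
          omega

-- ===== VERDICT (by name: the statement is the Claim_ definition above) =====
theorem find_max_divisible_number_spec : Claim_equal_find_max_divisible_number := by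
  intro digits _ hpre
  unfold Spec_find_max_divisible_number
  unfold find_max_divisible_number find_max_divisible_number_alt
  by_cases h0 : 0 ∈ digits
  · have hcnt : ¬ PySem.List.count digits 0 = 0 := by
      rw [PySem.List.count_eq]
      have := List.count_pos_iff.mpr h0
      omega
    rw [if_neg hcnt, if_neg (by simp [h0])]
    rw [PySem.List.remove?_eq_some_erase digits 0 h0]
    have hnn : ∀ d ∈ digits.erase 0, 0 ≤ d := by
      intro d hd
      rcases hpre with h | h
      · exact absurd h0 h
      · exact h d (List.mem_of_mem_erase hd)
    exact pvMain (digits.erase 0) hnn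
  · have hcnt : PySem.List.count digits 0 = 0 := by
      rw [PySem.List.count_eq]
      exact List.count_eq_zero.mpr h0
    rw [if_pos hcnt, if_pos (by simp [h0])]
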